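-- pv_equiv track=rewrite | github.com/deysantanu84/python-portfolio | problemSolving/sorting/elementRemoval.py | elementRemoval
-- ===== SOURCE A (Python) =====
-- def elementRemoval(A):
--     cost = 0
--     S = sum(A)
--     A = sorted(A, reverse=True)
--     while len(A):
--         cost += S
--         S -= A[0]
--         A.remove(A[0])
--     return cost
-- ===== SOURCE B (Python) =====
-- def elementRemoval(A):
--     total = 0
--     acc = 0
--     for x in sorted(A):
--         acc += x
--         total += acc
--     return total
-- ===== Notes on version B (the rewrite author's own statement) =====
-- stated objective: faster
-- what changed: Replaces the quadratic remove-the-max loop (each iteration scans the list via A.remove) by one ascending sort followed by a single prefix-sum accumulation pass.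
import Mathlib
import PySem

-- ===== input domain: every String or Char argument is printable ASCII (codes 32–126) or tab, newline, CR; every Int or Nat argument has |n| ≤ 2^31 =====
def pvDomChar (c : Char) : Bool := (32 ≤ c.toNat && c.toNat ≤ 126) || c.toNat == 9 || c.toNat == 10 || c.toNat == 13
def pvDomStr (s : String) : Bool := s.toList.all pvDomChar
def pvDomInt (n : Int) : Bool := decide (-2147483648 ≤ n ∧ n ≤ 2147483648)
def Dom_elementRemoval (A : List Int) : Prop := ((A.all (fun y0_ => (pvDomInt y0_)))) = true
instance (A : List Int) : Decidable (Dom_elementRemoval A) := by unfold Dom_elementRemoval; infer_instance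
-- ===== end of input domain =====

-- B replaces A's quadratic remove-the-largest loop by one ascending sort plus a single prefix-sum pass (O(n log n)).

-- ===== PORT A =====
-- the while loop: cost += S; S -= A[0]; A.remove(A[0])  — A[0] is the head, and
-- list.remove removes the FIRST occurrence of its argument, here exactly the head
def elementRemovalLoop : List Int → Int → Int → Int
  | [], cost, _ => cost
  | h :: t, cost, S => elementRemovalLoop t (cost + S) (S - h)

def elementRemoval (A : List Int) : Int :=
  elementRemovalLoop (PySem.List.sorted A (fun x => x) true) 0 A.sum

-- ===== PORT B =====
def elementRemoval_alt (A : List Int) : Int :=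
  ((PySem.List.sorted A (fun x => x) false).foldl
    (fun (p : Int × Int) x => (p.1 + (p.2 + x), p.2 + x)) (0, 0)).1

-- ===== PRECONDITION & SPEC =====
def Spec_elementRemoval (A : List Int) (out : Int) : Prop := out = elementRemoval_alt A
instance (A : List Int) (out : Int) : Decidable (Spec_elementRemoval A out) := by unfold Spec_elementRemoval; infer_instance

-- ===== CLAIM (what is proved, stated in full; the proofs are below) =====
def Claim_equal_elementRemoval : Prop := ∀ (A : List Int), Dom_elementRemoval A → Spec_elementRemoval A (elementRemoval A)

-- ===== LEMMAS AND PROOFS =====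

-- sum of the suffix sums of L, starting from running total S (A's loop with cost = 0)
def suffT : List Int → Int → Int
  | [], _ => 0
  | h :: t, S => S + suffT t (S - h)

-- sum of the prefix sums of M, starting from running prefix acc (B's loop total)
def prefF : List Int → Int → Int
  | [], _ => 0
  | h :: t, acc => (acc + h) + prefF t (acc + h)

theorem loopA_eq_suffT (L : List Int) (cost S : Int) :
    elementRemovalLoop L cost S = cost + suffT L S := by
  induction L generalizing cost S with
  | nil => simp [elementRemovalLoop, suffT]
  | cons h t ih => simp [elementRemovalLoop, suffT, ih]; ring

theorem foldB_eq_prefF (M : List Int) (total acc : Int) :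
    M.foldl (fun (p : Int × Int) x => (p.1 + (p.2 + x), p.2 + x)) (total, acc)
      = (total + prefF M acc, acc + M.sum) := by
  induction M generalizing total acc with
  | nil => simp [prefF]
  | cons h t ih => simp [List.foldl, prefF, ih]; constructor <;> ring

theorem prefF_append_singleton (M : List Int) (x acc : Int) :
    prefF (M ++ [x]) acc = prefF M acc + (acc + M.sum + x) := by
  induction M generalizing acc with
  | nil => simp [prefF]
  | cons h t ih => simp [prefF, ih]; ring

theorem suffT_reverse (M : List Int) : suffT M.reverse M.sum = prefF M 0 := by
  induction M using List.reverseRecOn with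
  | nil => simp [suffT, prefF]
  | append_singleton M' x ih =>
      rw [List.reverse_append]
      simp only [List.reverse_singleton, List.singleton_append, List.sum_append,
        List.sum_singleton, suffT]
      rw [show M'.sum + x - x = M'.sum by ring, ih, prefF_append_singleton]
      ring

theorem sorted_desc_eq_reverse_sorted (A : List Int) :
    PySem.List.sorted A (fun x => x) true = (PySem.List.sorted A (fun x => x) false).reverse := by
  have hp : (PySem.List.sorted A (fun x => x) true).Perm
      (PySem.List.sorted A (fun x => x) false).reverse :=
    (PySem.List.sorted_perm A (fun x => x) true).trans
      ((PySem.List.sorted_perm A (fun x => x) false).symm.trans (List.reverse_perm _).symm)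
  exact hp.eq_of_pairwise (le := fun a b : Int => b ≤ a)
    (fun a b _ _ h1 h2 => le_antisymm h2 h1)
    (PySem.List.sorted_pairwise_rev A (fun x => x))
    ((List.pairwise_reverse).mpr (PySem.List.sorted_pairwise A (fun x => x)))

-- ===== VERDICT (by name: the statement is the Claim_ definition above) =====
theorem elementRemoval_spec : Claim_equal_elementRemoval := by
  intro A _
  unfold Spec_elementRemoval elementRemoval elementRemoval_alt
  rw [loopA_eq_suffT, foldB_eq_prefF, sorted_desc_eq_reverse_sorted]
  have hs : A.sum = (PySem.List.sorted A (fun x => x) false).sum :=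
    ((PySem.List.sorted_perm A (fun x => x) false).sum_eq).symm
  rw [hs, suffT_reverse]
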